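-- pv_equiv track=rewrite | github.com/Protonk/BIDDER | experiments/art/fabric/digit_fabric_3k_nuke.py | n_primes_digits
-- ===== SOURCE A (Python) =====
-- def n_primes_digits(n, target, prime_cache=None):
--     parts = []
--     total = 0
--     if n == 1:
--         for p in prime_cache:
--             s = str(p)
--             parts.append(s)
--             total += len(s)
--             if total >= target:
--                 break
--     else:
--         k = 1
--         while total < target:
--             if k % n != 0:
--                 s = str(n * k)
--                 parts.append(s)
--                 total += len(s)
--             k += 1
--     flat = ''.join(parts)
--     return [int(c) for c in flat[:target]]
-- ===== SOURCE B (Python) =====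
-- def n_primes_digits(n, target, prime_cache=None):
--     # B: staged passes with a closed-form source. For n != 1 the j-th generated value
--     # (0-based) is n*(j + j//(n-1) + 1) -- the j-th positive integer not divisible by n,
--     # scaled by n -- so no modulo-skip counter loop is needed. Pass 1 only counts how
--     # many source values are needed; pass 2 materialises exactly those values; pass 3
--     # flattens their decimal digits and truncates to target.
--     if target <= 0:
--         return []
--     if n == 1:
--         m, total = 0, 0
--         for p in prime_cache:
--             total += len(str(p))
--             m += 1
--             if total >= target:
--                 break
--         vals = prime_cache[:m]
--     else:
--         m, total = 0, 0
--         while total < target: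
--             total += len(str(n * (m + m // (n - 1) + 1)))
--             m += 1
--         vals = [n * (j + j // (n - 1) + 1) for j in range(m)]
--     digits = [int(c) for v in vals for c in str(v)]
--     return digits[:target]
-- ===== Notes on version B (the rewrite author's own statement) =====
-- stated objective: alternative
-- what changed: B replaces A's single accumulate-append-and-break loop by staged passes: for n!=1 the j-th source value comes from the closed-form index formula n*(j + j//(n-1) + 1) (the j-th positive non-multiple of n, scaled) instead of A's modulo-skip counter loop; pass 1 only counts how many values are needed, pass 2 materialises them from the formula, pass 3 flattens digits and truncates.
-- intended difference: For n==1 with a negative target and a cache whose first element has more digits than |target|, A still appends that first element and returns its digits minus the last |target| characters (an accident of Python's negative slice after the unconditional first append), while B returns [], the intended result when at most zero digits are requested. — e.g. on n_primes_digits(1, -1, some [23]): A returns [2], B returns []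
-- outside the precondition, e.g. on n_primes_digits(1, 2, [55, -7]): A returns [5, 5], B returns [5, 5]; on n_primes_digits(1, 1, [-7]): A raises ValueError, B raises ValueError; on n_primes_digits(0, 3, None): A raises ZeroDivisionError, B returns [0, 0, 0]
import Mathlib
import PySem

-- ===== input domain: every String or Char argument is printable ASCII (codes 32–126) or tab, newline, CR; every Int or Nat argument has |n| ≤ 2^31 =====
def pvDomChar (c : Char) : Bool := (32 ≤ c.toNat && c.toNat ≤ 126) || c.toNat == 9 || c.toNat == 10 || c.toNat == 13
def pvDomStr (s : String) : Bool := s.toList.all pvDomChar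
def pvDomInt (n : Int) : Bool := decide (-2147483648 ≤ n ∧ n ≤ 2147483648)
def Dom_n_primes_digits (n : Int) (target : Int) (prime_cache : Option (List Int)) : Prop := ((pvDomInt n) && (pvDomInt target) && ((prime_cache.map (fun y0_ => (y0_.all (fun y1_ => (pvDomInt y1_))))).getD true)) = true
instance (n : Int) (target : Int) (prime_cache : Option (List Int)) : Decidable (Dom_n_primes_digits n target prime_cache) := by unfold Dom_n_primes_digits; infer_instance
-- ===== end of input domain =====

-- B replaces A's accumulate-and-break loop by staged passes over a closed-form source
-- (j-th value n*(j + j//(n-1) + 1) instead of a modulo-skip counter); objective: alternative.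


-- int(c) for a single character (Pre_ keeps '-' away from the consumed region)
def pvDigit (c : Char) : Int := (PySem.Int.ofChars? [c]).getD 0

-- ===== PORT A =====
-- the n == 1 branch: append str(p), add its length, break once total >= target
-- (''.join of the appended parts is carried directly as the accumulated char list)
def pvAgo1 (target : Int) : List Int → List Char → Int → List Char
  | [], flat, _ => flat
  | p :: rest, flat, total =>
    let s := PySem.Int.toChars p
    if total + (s.length : Int) ≥ target then flat ++ s
    else pvAgo1 target rest (flat ++ s) (total + (s.length : Int))

-- the while-loop branch; fuel only guards totality, one tick per Python iteration
def pvAwhile (n target : Int) : Nat → Int → List Char → Int → List Char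
  | 0, _, flat, _ => flat
  | fuel+1, k, flat, total =>
    if total < target then
      if PySem.Int.mod k n ≠ 0 then
        pvAwhile n target fuel (k+1) (flat ++ PySem.Int.toChars (n*k))
          (total + ((PySem.Int.toChars (n*k)).length : Int))
      else pvAwhile n target fuel (k+1) flat total
    else flat

-- enough iterations: for n ≥ 2 at least half of 2*target+2 counters are productive
def pvFuel (target : Int) : Nat := 2 * target.toNat + 2

def n_primes_digits (n : Int) (target : Int) (prime_cache : Option (List Int)) : List Int :=
  let flat := if n = 1 then pvAgo1 target (prime_cache.getD []) [] 0
              else pvAwhile n target (pvFuel target) 1 [] 0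
  (PySem.List.slice flat none (some target)).map pvDigit

-- ===== PORT B =====
-- pass 1 for n == 1: count how many cached values are needed
def pvBcached (target : Int) : List Int → Int → Nat
  | [], _ => 0
  | p :: rest, total =>
    let t' := total + ((PySem.Int.toChars p).length : Int)
    if t' ≥ target then 1 else 1 + pvBcached target rest t'

-- the closed-form j-th source value for n != 1
def pvBval (n j : Int) : Int := n * (j + PySem.Int.floordiv j (n-1) + 1)

-- pass 1 for n != 1: count m; fuel only guards totality, one tick per while iteration
def pvBcount (n target : Int) : Nat → Int → Int → Int
  | 0, m, _ => m
  | fuel+1, m, total =>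
    if total < target then
      pvBcount n target fuel (m+1) (total + ((PySem.Int.toChars (pvBval n m)).length : Int))
    else m

def n_primes_digits_alt (n : Int) (target : Int) (prime_cache : Option (List Int)) : List Int :=
  if target ≤ 0 then []
  else
    let vals := if n = 1 then (prime_cache.getD []).take (pvBcached target (prime_cache.getD []) 0)
                else (PySem.List.pyRange 0 (pvBcount n target (target.toNat + 1) 0 0) 1).map (pvBval n)
    ((vals.flatMap (fun v => PySem.Int.toChars v)).map pvDigit).take target.toNat

-- ===== PRECONDITION & SPEC =====
-- Pre_ excludes inputs on which A raises or diverges: n = 1 with a missing cache (TypeError),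
-- n = 0 with target > 0 (ZeroDivisionError), n < 0 with target > 0 (ValueError on '-', or an
-- infinite loop for n = -1); it also excludes n = 1 caches containing a negative number, where
-- a '-' among the first target characters raises ValueError in both programs — a
-- position-dependent condition that has no closed form over the input, so the whole case goes.
def Pre_n_primes_digits (n : Int) (target : Int) (prime_cache : Option (List Int)) : Prop :=
  if n = 1 then prime_cache ≠ none ∧ ∀ x ∈ prime_cache.getD [], 0 ≤ x
  else (2 ≤ n ∨ target ≤ 0)
instance (n : Int) (target : Int) (prime_cache : Option (List Int)) : Decidable (Pre_n_primes_digits n target prime_cache) := by unfold Pre_n_primes_digits; infer_instance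
def pvWitness_n_primes_digits : Int × Int × Option (List Int) := (2, 5, none)

-- For n = 1 with target < 0 and a cache whose first element has more digits than |target|, A
-- still appends that first element and returns its digits minus the last |target| characters (an
-- accident of Python's negative slice), while B returns [], the intended result when at most
-- zero digits are requested.
def D_n_primes_digits (n : Int) (target : Int) (prime_cache : Option (List Int)) : Prop :=
  n = 1 ∧ target < 0 ∧ 0 < (prime_cache.getD []).length ∧
    -target < ((PySem.Int.toChars ((prime_cache.getD []).headI)).length : Int)
instance (n : Int) (target : Int) (prime_cache : Option (List Int)) : Decidable (D_n_primes_digits n target prime_cache) := by unfold D_n_primes_digits; infer_instance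

def Spec_n_primes_digits (n : Int) (target : Int) (prime_cache : Option (List Int)) (out : List Int) : Prop := ¬ D_n_primes_digits n target prime_cache → out = n_primes_digits_alt n target prime_cache
instance (n : Int) (target : Int) (prime_cache : Option (List Int)) (out : List Int) : Decidable (Spec_n_primes_digits n target prime_cache out) := by unfold Spec_n_primes_digits; infer_instance

def pvDiffWitness_n_primes_digits : Int × Int × Option (List Int) := (1, -1, some [23])
def pvDiffWitnessOut_n_primes_digits : (List Int) × (List Int) := ([2], [])

-- ===== CLAIM (what is proved, stated in full; the proofs are below) =====
def Claim_unchanged_n_primes_digits : Prop := ∀ (n : Int) (target : Int) (prime_cache : Option (List Int)), Dom_n_primes_digits n target prime_cache → Pre_n_primes_digits n target prime_cache → Spec_n_primes_digits n target prime_cache (n_primes_digits n target prime_cache)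
def Claim_changed_n_primes_digits : Prop := Dom_n_primes_digits (pvDiffWitness_n_primes_digits.1) (pvDiffWitness_n_primes_digits.2.1) (pvDiffWitness_n_primes_digits.2.2) ∧ Pre_n_primes_digits (pvDiffWitness_n_primes_digits.1) (pvDiffWitness_n_primes_digits.2.1) (pvDiffWitness_n_primes_digits.2.2) ∧ D_n_primes_digits (pvDiffWitness_n_primes_digits.1) (pvDiffWitness_n_primes_digits.2.1) (pvDiffWitness_n_primes_digits.2.2) ∧ n_primes_digits (pvDiffWitness_n_primes_digits.1) (pvDiffWitness_n_primes_digits.2.1) (pvDiffWitness_n_primes_digits.2.2) = pvDiffWitnessOut_n_primes_digits.1 ∧ n_primes_digits_alt (pvDiffWitness_n_primes_digits.1) (pvDiffWitness_n_primes_digits.2.1) (pvDiffWitness_n_primes_digits.2.2) = pvDiffWitnessOut_n_primes_digits.2 ∧ pvDiffWitnessOut_n_primes_digits.1 ≠ pvDiffWitnessOut_n_primes_digits.2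
def Claim_exact_n_primes_digits : Prop := ∀ (n : Int) (target : Int) (prime_cache : Option (List Int)), Dom_n_primes_digits n target prime_cache → Pre_n_primes_digits n target prime_cache → D_n_primes_digits n target prime_cache → n_primes_digits n target prime_cache ≠ n_primes_digits_alt n target prime_cache

-- ===== LEMMAS AND PROOFS =====

-- str(v) is never the empty string
lemma pvToDigitsCoreNe (b : Nat) : ∀ (fuel n : Nat) (acc : List Char),
    acc ≠ [] → Nat.toDigitsCore b fuel n acc ≠ [] := by
  intro fuel
  induction fuel with
  | zero => intro n acc h; simpa [Nat.toDigitsCore] using h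
  | succ f ih =>
    intro n acc h
    simp only [Nat.toDigitsCore]
    split
    · simp
    · exact ih _ _ (by simp)

lemma pvToCharsNe (v : Int) : PySem.Int.toChars v ≠ [] := by
  simp only [PySem.Int.toChars]
  split
  · simp
  · show Nat.toDigits 10 v.toNat ≠ []
    unfold Nat.toDigits
    simp only [Nat.toDigitsCore]
    split
    · simp
    · exact pvToDigitsCoreNe 10 _ _ _ (by simp)

lemma pvToCharsLen (v : Int) : 1 ≤ ((PySem.Int.toChars v).length : Int) := by
  cases h' : PySem.Int.toChars v with
  | nil => exact absurd h' (pvToCharsNe v)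
  | cons a l => simp

-- n = 1 bridge: A's break-loop flat equals the flattened counted prefix of the cache
lemma pvCacheEq (target : Int) (l : List Int) : ∀ (flat : List Char) (total : Int),
    pvAgo1 target l flat total
      = flat ++ (l.take (pvBcached target l total)).flatMap (fun v => PySem.Int.toChars v) := by
  induction l with
  | nil => intro flat total; simp [pvAgo1, pvBcached]
  | cons p rest ih =>
    intro flat total
    rw [pvAgo1.eq_2, pvBcached.eq_2]
    by_cases hb : total + ((PySem.Int.toChars p).length : Int) ≥ target
    · rw [if_pos hb, if_pos hb]; simp
    · rw [if_neg hb, if_neg hb, ih, Nat.add_comm, List.take_succ_cons]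
      simp

-- closed-form index: pvBval picks out exactly A's productive counters (n ≥ 2)
lemma pvF_step (n j : Int) (hn : 2 ≤ n) :
    PySem.Int.mod (j + PySem.Int.floordiv j (n-1) + 1) n ≠ 0 ∧
    (j+1) + PySem.Int.floordiv (j+1) (n-1) + 1 =
      (if PySem.Int.mod ((j + PySem.Int.floordiv j (n-1) + 1) + 1) n ≠ 0
       then (j + PySem.Int.floordiv j (n-1) + 1) + 1
       else (j + PySem.Int.floordiv j (n-1) + 1) + 2) := by
  have hd : (0:Int) < n - 1 := by omega
  have hq' := (PySem.Int.floordiv_eq_iff_of_pos (q := PySem.Int.floordiv j (n-1)) hd).mp rfl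
  set q := PySem.Int.floordiv j (n-1) with hqdef
  set r := j - q * (n-1) with hrdef
  have hr : 0 ≤ r ∧ r < n - 1 := by constructor <;> nlinarith [hq'.1, hq'.2]
  have hmod1 : PySem.Int.mod (j + q + 1) n = r + 1 := by
    rw [show j + q + 1 = (r + 1) + n * q by rw [hrdef]; ring,
        PySem.Int.mod_eq_emod_of_pos (by omega), Int.add_mul_emod_self_left]
    exact Int.emod_eq_of_lt (by omega) (by omega)
  refine ⟨by rw [hmod1]; omega, ?_⟩
  by_cases hcase : r + 1 < n - 1
  · have hfd : PySem.Int.floordiv (j+1) (n-1) = q := by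
      rw [PySem.Int.floordiv_eq_iff_of_pos hd]
      constructor <;> nlinarith [hq'.1]
    have hmod2 : PySem.Int.mod (j + q + 1 + 1) n = r + 2 := by
      rw [show j + q + 1 + 1 = (r + 2) + n * q by rw [hrdef]; ring,
          PySem.Int.mod_eq_emod_of_pos (by omega), Int.add_mul_emod_self_left]
      exact Int.emod_eq_of_lt (by omega) (by omega)
    rw [if_pos (by rw [hmod2]; omega), hfd]; ring
  · have hr1 : r = n - 2 := by omega
    have hfd : PySem.Int.floordiv (j+1) (n-1) = q + 1 := by
      rw [PySem.Int.floordiv_eq_iff_of_pos hd]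
      constructor <;> nlinarith [hq'.1]
    have hmod2 : PySem.Int.mod (j + q + 1 + 1) n = 0 := by
      rw [show j + q + 1 + 1 = n * (q + 1) by linear_combination hr1 - hrdef,
          PySem.Int.mod_eq_emod_of_pos (by omega)]
      exact Int.mul_emod_right n (q+1)
    rw [if_neg (by rw [hmod2]; omega), hfd]; omega

-- B's counter never goes down
lemma pvBcount_ge (n target : Int) : ∀ (fuel : Nat) (m total : Int),
    m ≤ pvBcount n target fuel m total := by
  intro fuel
  induction fuel with
  | zero => intro m total; simp [pvBcount]
  | succ f ih =>
    intro m total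
    rw [pvBcount.eq_2]
    by_cases h : total < target
    · rw [if_pos h]; exact le_trans (by omega) (ih (m+1) _)
    · rw [if_neg h]

-- B's count loop stops once the target is met
lemma pvBcount_done (n target : Int) (fuel : Nat) (m total : Int) (h : ¬ total < target) :
    pvBcount n target fuel m total = m := by
  cases fuel with
  | zero => rfl
  | succ f => rw [pvBcount.eq_2, if_neg h]

lemma pvAwhile_done (n target : Int) (fuel : Nat) (k : Int) (flat : List Char) (total : Int)
    (h : ¬ total < target) : pvAwhile n target fuel k flat total = flat := by
  cases fuel with
  | zero => rw [pvAwhile.eq_1]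
  | succ f => rw [pvAwhile.eq_2, if_neg h]

-- n ≥ 2 bridge: A's skip-loop flat equals the flattened formula values over the counted range
lemma pvGenEq (n target : Int) (hn : 2 ≤ n) : ∀ (fuelA fuelB : Nat) (j total : Int) (flat : List Char),
    0 ≤ j → total < target → (target - total).toNat ≤ fuelB →
    2 * (target - total).toNat ≤ fuelA →
    pvAwhile n target fuelA (j + PySem.Int.floordiv j (n-1) + 1) flat total
      = flat ++ ((PySem.List.pyRange j (pvBcount n target fuelB j total) 1).map (pvBval n)).flatMap
          (fun v => PySem.Int.toChars v) := by
  intro fuelA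
  induction fuelA using Nat.strong_induction_on with
  | _ fuelA ih =>
    intro fuelB j total flat hj ht hfB hfA
    obtain ⟨hmod, hnext⟩ := pvF_step n j hn
    obtain ⟨fA, rfl⟩ : ∃ fA, fuelA = fA + 1 + 1 := ⟨fuelA - 2, by omega⟩
    obtain ⟨fB, rfl⟩ : ∃ fB, fuelB = fB + 1 := ⟨fuelB - 1, by omega⟩
    set k := j + PySem.Int.floordiv j (n-1) + 1 with hk
    have hval : pvBval n j = n * k := by rw [pvBval, hk]
    have hlen1 := pvToCharsLen (n * k)
    rw [pvAwhile.eq_2, if_pos ht, if_pos hmod, pvBcount.eq_2, if_pos ht, hval]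
    set total' := total + ((PySem.Int.toChars (n*k)).length : Int) with ht'
    have hge := pvBcount_ge n target fB (j+1) total'
    have hcons : PySem.List.pyRange j (pvBcount n target fB (j+1) total') 1
        = j :: PySem.List.pyRange (j+1) (pvBcount n target fB (j+1) total') 1 :=
      PySem.List.pyRange_one_cons (by omega)
    by_cases hdone : total' < target
    · by_cases hm2 : PySem.Int.mod (k + 1) n ≠ 0
      · have hK : (j+1) + PySem.Int.floordiv (j+1) (n-1) + 1 = k + 1 := by
          rw [hnext, if_pos hm2]
        rw [show k + 1 = (j+1) + PySem.Int.floordiv (j+1) (n-1) + 1 from hK.symm]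
        rw [ih (fA+1) (by omega) fB (j+1) total' (flat ++ PySem.Int.toChars (n*k))
              (by omega) hdone (by omega) (by omega)]
        rw [hcons]
        simp [hval]
      · push_neg at hm2
        have hK : (j+1) + PySem.Int.floordiv (j+1) (n-1) + 1 = k + 2 := by
          rw [hnext, if_neg (by simp [hm2])]
        rw [pvAwhile.eq_2, if_pos hdone, if_neg (by simp [hm2])]
        rw [show k + 1 + 1 = (j+1) + PySem.Int.floordiv (j+1) (n-1) + 1 by rw [hK]; ring]
        rw [ih fA (by omega) fB (j+1) total' (flat ++ PySem.Int.toChars (n*k))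
              (by omega) hdone (by omega) (by omega)]
        rw [hcons]
        simp [hval]
    · rw [pvAwhile_done n target (fA+1) (k+1) _ _ hdone]
      rw [hcons, pvBcount_done n target fB (j+1) total' hdone,
          PySem.List.pyRange_one, show ((j+1)-(j+1)).toNat = 0 by omega]
      simp [hval]

-- ===== VERDICT (by name: the statement is the Claim_ definition above) =====
theorem n_primes_digits_spec : Claim_unchanged_n_primes_digits := by
  intro n target pc hDom hPre hND
  simp only [n_primes_digits, n_primes_digits_alt]
  by_cases ht : target ≤ 0
  · rw [if_pos ht]
    by_cases hn : n = 1
    · subst hn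
      rw [if_pos (show (1:Int) = 1 from rfl)]
      cases hl : pc.getD [] with
      | nil => simp [pvAgo1.eq_1, PySem.List.slice]
      | cons p rest =>
        rw [pvAgo1.eq_2, if_pos (show (0:Int) + ((PySem.Int.toChars p).length : Int) ≥ target by have := pvToCharsLen p; omega)]
        have hnd : ¬ (target < 0 ∧ -target < ((PySem.Int.toChars p).length : Int)) := by
          intro ⟨h1, h2⟩
          exact hND ⟨rfl, h1, by rw [hl]; simp, by rw [hl]; simpa using h2⟩
        have hb : PySem.List.clampIdx ((PySem.Int.toChars p).length) target = 0 := by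
          unfold PySem.List.clampIdx
          split_ifs <;> simp at hnd ⊢ <;> omega
        simp [PySem.List.slice, hb]
    · rw [if_neg hn]
      have hA : pvAwhile n target (pvFuel target) 1 [] 0 = [] :=
        pvAwhile_done n target (pvFuel target) 1 [] 0 (by omega)
      simp [hA, PySem.List.slice]
  · push_neg at ht
    rw [if_neg (show ¬ target ≤ 0 by omega)]
    by_cases hn : n = 1
    · subst hn
      rw [if_pos (show (1:Int) = 1 from rfl), if_pos (show (1:Int) = 1 from rfl), PySem.List.slice_to _ (by omega)]
      rw [pvCacheEq target (pc.getD []) [] 0]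
      simp [List.map_take]
    · rw [if_neg hn, if_neg hn, PySem.List.slice_to _ (by omega)]
      have hn2 : 2 ≤ n := by
        unfold Pre_n_primes_digits at hPre
        rw [if_neg hn] at hPre
        omega
      have h0 : (0:Int) + PySem.Int.floordiv 0 (n-1) + 1 = 1 := by
        rw [PySem.Int.floordiv_eq_ediv_of_pos (by omega)]; simp
      have hGen := pvGenEq n target hn2 (pvFuel target) (target.toNat + 1) 0 0 []
            (by omega) (by omega) (by omega) (by unfold pvFuel; omega)
      rw [h0] at hGen
      rw [hGen]
      simp [List.map_take]

theorem n_primes_digits_changed : Claim_changed_n_primes_digits := by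
  unfold Claim_changed_n_primes_digits; decide

theorem n_primes_digits_tight : Claim_exact_n_primes_digits := by
  intro n target pc hDom hPre hD
  obtain ⟨hn1, htn, hlen, hdlen⟩ := hD
  subst hn1
  simp only [n_primes_digits, n_primes_digits_alt]
  simp only [if_true]
  rw [if_pos (show target ≤ 0 by omega)]
  cases hl : pc.getD [] with
  | nil => rw [hl] at hlen; simp at hlen
  | cons p rest =>
    rw [pvAgo1.eq_2, if_pos (show (0:Int) + ((PySem.Int.toChars p).length : Int) ≥ target by have := pvToCharsLen p; omega)]
    rw [hl] at hdlen
    simp only [List.headI] at hdlen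
    intro hEq
    have hc : 0 < PySem.List.clampIdx ((PySem.Int.toChars p).length) target := by
      unfold PySem.List.clampIdx
      split_ifs <;> simp at hdlen ⊢ <;> omega
    apply_fun List.length at hEq
    simp [PySem.List.slice] at hEq
    omega
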